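-- pv_equiv track=rewrite | github.com/grehnen/aoc | 2024/d7.py | f
-- ===== SOURCE A (Python) =====
-- from typing import List
--
-- def f(total, terms, mode) -> List[int]:
--     if len(terms) == 2:
--         results = [terms[0] + terms[1], terms[0] * terms[1]]
--         if mode == 'b':
--             results.append(int(str(terms[0]) + str(terms[1])))
--         return results
--     else:
--         results = []
--         for i in f(total, terms[:-1], mode):
--             results.append(terms[-1] + i)
--             results.append(terms[-1] * i)
--             if mode == 'b':
--                 results.append(int(str(i) + str(terms[-1])))
--         results = [i for i in results if i <= total]
--         return results
-- ===== SOURCE B (Python) =====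
-- def f(total, terms, mode):
--     def ops(i, t):
--         out = [t + i, t * i]
--         if mode == 'b':
--             out.append(int(str(i) + str(t)))
--         return out
--     results = ops(terms[0], terms[1])
--     for t in terms[2:]:
--         new = [x for i in results for x in ops(i, t)]
--         results = [x for x in new if x <= total]
--     return results
-- ===== Notes on version B (the rewrite author's own statement) =====
-- stated objective: simpler
-- what changed: Replaces A's recursion on terms[:-1] (rebuilding a sliced copy of the list at every level) by a single iterative left fold over terms[2:] with a flatMap-style comprehension over a shared ops(i, t) helper; same values in the same order.
-- outside the precondition, e.g. on f(-100, [1, 2, 3, -5], 'b'): A returns [], B returns []; on f(10, [1, 2, -3], 'b'): A raises ValueError, B raises ValueError; on f(5, [7], 'a'): A raises RecursionError, B raises IndexError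
import Mathlib
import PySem

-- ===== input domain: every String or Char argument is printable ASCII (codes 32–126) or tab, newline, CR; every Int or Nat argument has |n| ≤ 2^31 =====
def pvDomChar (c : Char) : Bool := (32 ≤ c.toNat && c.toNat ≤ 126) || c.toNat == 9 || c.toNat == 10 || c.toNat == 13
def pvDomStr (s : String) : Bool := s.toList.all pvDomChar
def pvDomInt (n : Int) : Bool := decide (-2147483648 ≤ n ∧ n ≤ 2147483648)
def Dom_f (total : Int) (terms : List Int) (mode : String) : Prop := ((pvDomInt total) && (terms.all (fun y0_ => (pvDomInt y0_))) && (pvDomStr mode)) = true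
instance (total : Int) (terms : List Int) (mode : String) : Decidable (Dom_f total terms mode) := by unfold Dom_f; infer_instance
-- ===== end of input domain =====

-- B replaces A's tail recursion on terms[:-1] by a single left fold over terms[2:] (objective: simpler/iterative decomposition, same cost).

-- ===== PORT A =====
-- int(str(i) + str(t)) ; .getD 0 is reached only where Python raises ValueError (excluded by Pre_f)
def pyCat (i t : Int) : Int :=
  (PySem.Int.ofChars? (PySem.Int.toChars i ++ PySem.Int.toChars t)).getD 0

-- fuel = terms.length makes A's recursion on terms[:-1] total; with 2 ≤ len (Pre_f) the fuel never runs out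
def fAux : Nat → Int → List Int → String → List Int
  | 0, _, _, _ => []
  | fuel+1, total, terms, mode =>
    if terms.length = 2 then
      let results := [PySem.List.pyGetD terms 0 0 + PySem.List.pyGetD terms 1 0,
                      PySem.List.pyGetD terms 0 0 * PySem.List.pyGetD terms 1 0]
      if mode = "b" then
        results ++ [pyCat (PySem.List.pyGetD terms 0 0) (PySem.List.pyGetD terms 1 0)]
      else results
    else
      let prev := fAux fuel total (PySem.List.slice terms none (some (-1))) mode
      let results := prev.foldl (fun r i =>
        (r ++ [PySem.List.pyGetD terms (-1) 0 + i, PySem.List.pyGetD terms (-1) 0 * i]) ++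
          (if mode = "b" then [pyCat i (PySem.List.pyGetD terms (-1) 0)] else [])) []
      results.filter (fun i => i ≤ total)

def f (total : Int) (terms : List Int) (mode : String) : List Int :=
  fAux terms.length total terms mode

-- ===== PORT B =====
def opsB (mode : String) (i t : Int) : List Int :=
  let out := [t + i, t * i]
  if mode = "b" then out ++ [pyCat i t] else out

def f_alt (total : Int) (terms : List Int) (mode : String) : List Int :=
  match terms with
  | t0 :: t1 :: rest =>
      rest.foldl (fun results t =>
        ((results.flatMap (fun i => opsB mode i t)).filter (fun x => x ≤ total)))
        (opsB mode t0 t1)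
  | _ => []

-- ===== PRECONDITION & SPEC =====
-- Pre_f excludes (a) terms with fewer than 2 elements, where A hits RecursionError (B an IndexError), and
-- (b) mode 'b' with a negative term after the first, where int(str(i)+str(t)) raises ValueError in both
-- programs on every input whose intermediate result list is nonempty (when it is empty both return []).
def Pre_f (total : Int) (terms : List Int) (mode : String) : Prop :=
  2 ≤ terms.length ∧ (mode = "b" → ∀ t ∈ terms.drop 1, 0 ≤ t)
instance (total : Int) (terms : List Int) (mode : String) : Decidable (Pre_f total terms mode) := by unfold Pre_f; infer_instance
def pvWitness_f : Int × List Int × String := (29, [2, 3, 4, 5], "b")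

def Spec_f (total : Int) (terms : List Int) (mode : String) (out : List Int) : Prop := out = f_alt total terms mode
instance (total : Int) (terms : List Int) (mode : String) (out : List Int) : Decidable (Spec_f total terms mode out) := by unfold Spec_f; infer_instance

-- ===== CLAIM (what is proved, stated in full; the proofs are below) =====
def Claim_equal_f : Prop := ∀ (total : Int) (terms : List Int) (mode : String), Dom_f total terms mode → Pre_f total terms mode → Spec_f total terms mode (f total terms mode)

-- ===== LEMMAS AND PROOFS =====

-- A's loop body, folded over prev, is flatMap of the per-element operations
lemma fAux_loop_eq_flatMap (mode : String) (t : Int) (prev : List Int) :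
    prev.foldl (fun r i =>
        (r ++ [t + i, t * i]) ++ (if mode = "b" then [pyCat i t] else [])) []
      = prev.flatMap (fun i => opsB mode i t) := by
  have h := PySem.List.foldl_append_eq_flatMap
      (g := fun i => [t + i, t * i] ++ (if mode = "b" then [pyCat i t] else []))
      (l := prev) (acc := ([] : List Int))
  simp only [List.append_assoc] at h ⊢
  rw [h]
  simp only [List.nil_append]
  congr 1
  funext i
  simp [opsB]
  split_ifs <;> simp

-- the core equivalence, by induction on the trailing terms from the right
lemma fAux_eq_f_alt (total : Int) (mode : String) (t0 t1 : Int) (rest : List Int) :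
    fAux (rest.length + 2) total (t0 :: t1 :: rest) mode = f_alt total (t0 :: t1 :: rest) mode := by
  induction rest using List.reverseRecOn with
  | nil =>
      have h1 : PySem.List.pyGetD [t0, t1] (1 : Int) (0 : Int) = t1 := by
        simp [pysem]
      simp only [fAux, f_alt, opsB, List.length_cons, List.length_nil,
        PySem.List.pyGetD_zero_cons, h1, List.foldl_nil]
      split_ifs <;> simp [add_comm, mul_comm]
  | append_singleton r t ih =>
      have hne : ¬ (t0 :: t1 :: (r ++ [t])).length = 2 := by simp
      have hslice : PySem.List.slice (t0 :: t1 :: (r ++ [t])) none (some (-1)) = t0 :: t1 :: r := by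
        rw [PySem.List.slice_to_neg_one,
          show (t0 :: t1 :: (r ++ [t])) = (t0 :: t1 :: r) ++ [t] by simp,
          List.dropLast_concat]
      have hlast : PySem.List.pyGetD (t0 :: t1 :: (r ++ [t])) (-1) (0 : Int) = t := by
        have : (t0 :: t1 :: (r ++ [t])) = (t0 :: t1 :: r) ++ [t] := by simp
        rw [this, PySem.List.pyGetD_neg_one_append_singleton]
      have hfold : (r ++ [t]).length + 2 = (r.length + 2) + 1 := by simp
      rw [hfold]
      show fAux ((r.length + 2) + 1) total (t0 :: t1 :: (r ++ [t])) mode = _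
      rw [fAux]
      simp only [hne, if_false, hslice, hlast]
      rw [ih]
      rw [fAux_loop_eq_flatMap]
      show (((f_alt total (t0 :: t1 :: r) mode).flatMap (fun i => opsB mode i t)).filter (fun i => i ≤ total)) = _
      simp [f_alt, List.foldl_append]

-- ===== VERDICT (by name: the statement is the Claim_ definition above) =====
theorem f_spec : Claim_equal_f := by
  intro total terms mode _ hpre
  unfold Spec_f f
  match terms, hpre with
  | t0 :: t1 :: rest, _ =>
    have : (t0 :: t1 :: rest).length = rest.length + 2 := by simp
    rw [this, fAux_eq_f_alt]
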